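-- pv_equiv track=rewrite | github.com/simon-dreyer/Shortest_path_sampling | code_python/Complexite_operations.py | c_Construct_DAG
-- ===== SOURCE A (Python) =====
-- def c_Construct_DAG(G,selected_edges,tables,source):
--     """ Construit le DAG enraciné en source qui donne les ePredecesseur avec la somme partielle des ePCC en deuxième coordonnée. """
--     pred = {}
--     pred[source] = []
--     compteur = 0
--
--     for e in selected_edges:
--         u, v = e[0], e[1]
--         if v in pred:
--             pred[v].append((u,tables[source][u] + pred[v][-1][1]))
--         else :
--             pred[v] = [(u,tables[source][u])]
--         compteur += 1
--     return pred,compteur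
-- ===== SOURCE B (Python) =====
-- def c_Construct_DAG(G, selected_edges, tables, source):
--     """Group-first, accumulate-second: first group edge tails by head (pre-seeded
--     with source -> []), then compute each head's inclusive running sums."""
--     groups = {source: []}
--     for u, v in selected_edges:
--         groups[v] = groups.get(v, []) + [u]
--     row = tables.get(source, {})
--     pred = {}
--     for v, us in groups.items():
--         s = 0
--         lst = []
--         for u in us:
--             s = s + row[u]
--             lst.append((u, s))
--         pred[v] = lst
--     return pred, len(selected_edges)
-- ===== Notes on version B (the rewrite author's own statement) =====
-- stated objective: alternative
-- what changed: A interleaves grouping and accumulation in one fused loop that peeks at pred[v][-1]; B first groups edge tails by head into an ordered dict pre-seeded with source -> [], then computes each head's inclusive running sums in a separate pass over the groups.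
import Mathlib
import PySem

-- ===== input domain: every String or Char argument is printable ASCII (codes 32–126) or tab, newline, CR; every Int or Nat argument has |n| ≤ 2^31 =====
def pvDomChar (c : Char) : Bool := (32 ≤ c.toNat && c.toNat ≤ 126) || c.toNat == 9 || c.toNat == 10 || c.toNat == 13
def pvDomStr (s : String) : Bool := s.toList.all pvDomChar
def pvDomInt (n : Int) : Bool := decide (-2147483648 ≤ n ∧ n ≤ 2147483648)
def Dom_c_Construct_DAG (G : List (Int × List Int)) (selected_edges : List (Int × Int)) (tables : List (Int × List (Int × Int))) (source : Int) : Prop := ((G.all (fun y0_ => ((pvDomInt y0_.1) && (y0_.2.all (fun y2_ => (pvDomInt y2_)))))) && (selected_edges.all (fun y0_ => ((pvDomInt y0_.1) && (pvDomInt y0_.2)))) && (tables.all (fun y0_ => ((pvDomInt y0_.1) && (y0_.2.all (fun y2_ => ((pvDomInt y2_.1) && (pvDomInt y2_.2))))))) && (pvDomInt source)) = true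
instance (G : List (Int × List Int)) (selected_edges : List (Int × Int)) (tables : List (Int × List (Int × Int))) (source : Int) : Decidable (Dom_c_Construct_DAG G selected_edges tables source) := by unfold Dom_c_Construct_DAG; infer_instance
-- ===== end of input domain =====

-- B replaces A's fused loop (peeking at pred[v][-1]) by a group-tails-by-head pass followed by
-- a per-head running-sum pass; objective: a different, plainer decomposition (same cost).

-- shared primitive: Python dict item lookup d[k] (first match; none = KeyError)
def pvLookup {α : Type} (l : List (Int × α)) (k : Int) : Option α :=
  (l.find? (fun p => p.1 == k)).map (·.2)

-- ===== PORT A =====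
-- loop body of A: one edge e = (u, v).  tables[source][u] is ported with pvLookup/getD;
-- the .getD defaults are never reached under Pre_ (Python raises there).
def predStep (tables : List (Int × List (Int × Int))) (source : Int)
    (st : PySem.Dict Int (List (Int × Int)) × Int) (e : Int × Int) :
    PySem.Dict Int (List (Int × Int)) × Int :=
  let u := e.1
  let v := e.2
  let pred := st.1
  if pred.contains v then
    (pred.insert v (pred.getD v [] ++
        [(u, (pvLookup ((pvLookup tables source).getD []) u).getD 0 +
             ((PySem.List.pyGet? (pred.getD v []) (-1)).map (·.2)).getD 0)]),
     st.2 + 1)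
  else
    (pred.insert v [(u, (pvLookup ((pvLookup tables source).getD []) u).getD 0)], st.2 + 1)

def c_Construct_DAG (G : List (Int × List Int)) (selected_edges : List (Int × Int)) (tables : List (Int × List (Int × Int))) (source : Int) : (List (Int × List (Int × Int))) × Int :=
  let st := selected_edges.foldl (predStep tables source)
      (PySem.Dict.empty.insert source ([] : List (Int × Int)), (0 : Int))
  (st.1.items, st.2)

-- ===== PORT B =====
-- loop body of B's first pass: groups[v] = groups.get(v, []) + [u]
def groupStep (d : PySem.Dict Int (List Int)) (e : Int × Int) : PySem.Dict Int (List Int) :=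
  d.insert e.2 (d.getD e.2 [] ++ [e.1])

-- B's second pass: inclusive running sums over one group (s is the running sum)
def pvAccum (row : List (Int × Int)) (s : Int) : List Int → List (Int × Int)
  | [] => []
  | u :: us =>
    let s' := s + (pvLookup row u).getD 0
    (u, s') :: pvAccum row s' us

def c_Construct_DAG_alt (G : List (Int × List Int)) (selected_edges : List (Int × Int)) (tables : List (Int × List (Int × Int))) (source : Int) : (List (Int × List (Int × Int))) × Int :=
  let groups := selected_edges.foldl groupStep
      (PySem.Dict.empty.insert source ([] : List Int))
  let row := (pvLookup tables source).getD []
  (groups.items.map (fun p => (p.1, pvAccum row 0 p.2)), (selected_edges.length : Int))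

-- ===== PRECONDITION & SPEC =====
-- Pre_ = exactly the inputs on which Python A returns: every edge head differs from source
-- (A peeks pred[source][-1] on an empty list : IndexError) and, when there is at least one
-- edge, source is a key of tables and every edge tail a key of tables[source] (else KeyError).
def Pre_c_Construct_DAG (G : List (Int × List Int)) (selected_edges : List (Int × Int)) (tables : List (Int × List (Int × Int))) (source : Int) : Prop :=
  ∀ e ∈ selected_edges, e.2 ≠ source ∧
    (tables.find? (fun p => p.1 == source)).isSome ∧
    ((((tables.find? (fun p => p.1 == source)).map (·.2)).getD []).find?
        (fun p => p.1 == e.1)).isSome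
instance (G : List (Int × List Int)) (selected_edges : List (Int × Int)) (tables : List (Int × List (Int × Int))) (source : Int) : Decidable (Pre_c_Construct_DAG G selected_edges tables source) := by unfold Pre_c_Construct_DAG; infer_instance

def pvWitness_c_Construct_DAG : (List (Int × List Int)) × (List (Int × Int)) × (List (Int × List (Int × Int))) × Int :=
  ([], [(1, 2)], [(0, [(1, 5)])], 0)

def Spec_c_Construct_DAG (G : List (Int × List Int)) (selected_edges : List (Int × Int)) (tables : List (Int × List (Int × Int))) (source : Int) (out : (List (Int × List (Int × Int))) × Int) : Prop := out = c_Construct_DAG_alt G selected_edges tables source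
instance (G : List (Int × List Int)) (selected_edges : List (Int × Int)) (tables : List (Int × List (Int × Int))) (source : Int) (out : (List (Int × List (Int × Int))) × Int) : Decidable (Spec_c_Construct_DAG G selected_edges tables source out) := by unfold Spec_c_Construct_DAG; infer_instance

-- ===== CLAIM (what is proved, stated in full; the proofs are below) =====
def Claim_equal_c_Construct_DAG : Prop := ∀ (G : List (Int × List Int)) (selected_edges : List (Int × Int)) (tables : List (Int × List (Int × Int))) (source : Int), Dom_c_Construct_DAG G selected_edges tables source → Pre_c_Construct_DAG G selected_edges tables source → Spec_c_Construct_DAG G selected_edges tables source (c_Construct_DAG G selected_edges tables source)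

-- ===== LEMMAS AND PROOFS =====

-- the weight of a tail, and the total weight of a group
def pvW (row : List (Int × Int)) (u : Int) : Int := (pvLookup row u).getD 0
def pvSum (row : List (Int × Int)) (us : List Int) : Int := (us.map (pvW row)).sum

theorem pvAccum_append (row : List (Int × Int)) (s : Int) (us vs : List Int) :
    pvAccum row s (us ++ vs) = pvAccum row s us ++ pvAccum row (s + pvSum row us) vs := by
  induction us generalizing s with
  | nil => simp [pvAccum, pvSum]
  | cons x xs ih =>
    simp only [List.cons_append, pvAccum, ih, pvSum, List.map_cons, List.sum_cons, pvW]
    ring_nf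

theorem pvAccum_last (row : List (Int × Int)) (s : Int) (us : List Int) :
    (((pvAccum row s us).getLast?).map (·.2)).getD s = s + pvSum row us := by
  induction us generalizing s with
  | nil => simp [pvAccum, pvSum]
  | cons x xs ih =>
    cases xs with
    | nil => simp [pvAccum, pvSum, pvW]
    | cons y ys =>
      have hs : ((pvAccum row (s + (pvLookup row x).getD 0) (y :: ys)).getLast?).isSome := by
        simp [pvAccum]
      obtain ⟨z, hz⟩ := Option.isSome_iff_exists.mp hs
      have h1 := ih (s + (pvLookup row x).getD 0)
      rw [hz] at h1
      simp only [pvAccum] at hz ⊢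
      rw [List.getLast?_cons_cons, hz]
      simp only [Option.map_some, Option.getD_some] at h1 ⊢
      rw [h1]
      simp [pvSum, pvW]
      ring

-- the dict-level simulation: B's group dict, pushed through the accumulate pass
def mapD (row : List (Int × Int)) (d : PySem.Dict Int (List Int)) :
    PySem.Dict Int (List (Int × Int)) :=
  PySem.Dict.mk (d.items.map (fun p => (p.1, pvAccum row 0 p.2)))

theorem get?_mapD (row : List (Int × Int)) (d : PySem.Dict Int (List Int)) (v : Int) :
    (mapD row d).get? v = (d.get? v).map (pvAccum row 0) := by
  obtain ⟨l⟩ := d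
  induction l with
  | nil => simp [mapD, PySem.Dict.get?]
  | cons p ps ih =>
    obtain ⟨k, w⟩ := p
    simp only [mapD, List.map_cons, PySem.Dict.get?_mk_cons] at *
    by_cases h : k == v <;> simp [h, ih]

theorem contains_mapD (row : List (Int × Int)) (d : PySem.Dict Int (List Int)) (v : Int) :
    (mapD row d).contains v = d.contains v := by
  rw [PySem.Dict.contains_eq_isSome_get?, PySem.Dict.contains_eq_isSome_get?, get?_mapD]
  cases d.get? v <;> simp

theorem getD_mapD (row : List (Int × Int)) (d : PySem.Dict Int (List Int)) (v : Int) :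
    (mapD row d).getD v [] = pvAccum row 0 (d.getD v []) := by
  rw [PySem.Dict.getD_eq_get?_getD, PySem.Dict.getD_eq_get?_getD, get?_mapD]
  cases d.get? v <;> simp [pvAccum]

theorem insert_mapD (row : List (Int × Int)) (d : PySem.Dict Int (List Int)) (v : Int)
    (us : List Int) :
    mapD row (d.insert v us) = (mapD row d).insert v (pvAccum row 0 us) := by
  apply PySem.Dict.ext
  simp only [mapD, PySem.Dict.items_insert]
  rw [show (PySem.Dict.mk (d.items.map (fun p => (p.1, pvAccum row 0 p.2)))).contains v
        = d.contains v from contains_mapD row d v]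
  by_cases hc : d.contains v
  · simp only [hc, if_true, List.map_map]
    apply List.map_congr_left
    intro p _
    by_cases h : p.1 == v
    · simp [Function.comp, h]
    · simp [Function.comp, h]
  · simp [hc]

theorem step_mapD (tables : List (Int × List (Int × Int))) (source : Int)
    (d : PySem.Dict Int (List Int)) (n : Int) (e : Int × Int) :
    predStep tables source (mapD ((pvLookup tables source).getD []) d, n) e =
      (mapD ((pvLookup tables source).getD []) (groupStep d e), n + 1) := by
  set row := (pvLookup tables source).getD [] with hrow
  unfold predStep groupStep
  simp only [contains_mapD]
  by_cases hc : d.contains e.2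
  · simp only [hc, if_true, getD_mapD, PySem.List.pyGet?_neg_one, pvAccum_last,
      insert_mapD, pvAccum_append, zero_add, pvAccum]
    rw [← hrow]
    refine Prod.ext ?_ rfl
    congr 1
    rw [Int.add_comm ((pvLookup row e.1).getD 0) (pvSum row (d.getD e.2 []))]
  · have h0 : d.getD e.2 [] = [] := by
      rw [PySem.Dict.getD_eq_get?_getD]
      cases hg : d.get? e.2
      · rfl
      · rw [PySem.Dict.contains_eq_isSome_get?, hg] at hc; simp at hc
    simp only [hc, insert_mapD, h0]
    rw [← hrow]
    refine Prod.ext ?_ rfl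
    congr 1
    simp [pvAccum]

theorem fold_mapD (tables : List (Int × List (Int × Int))) (source : Int)
    (edges : List (Int × Int)) (d : PySem.Dict Int (List Int)) (n : Int) :
    edges.foldl (predStep tables source) (mapD ((pvLookup tables source).getD []) d, n) =
      (mapD ((pvLookup tables source).getD []) (edges.foldl groupStep d),
       n + edges.length) := by
  induction edges generalizing d n with
  | nil => simp
  | cons e es ih =>
    simp only [List.foldl_cons, step_mapD, ih, List.length_cons]
    refine Prod.ext rfl ?_
    push_cast
    ring

theorem init_mapD (row : List (Int × Int)) (source : Int) :
    PySem.Dict.empty.insert source ([] : List (Int × Int)) =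
      mapD row (PySem.Dict.empty.insert source ([] : List Int)) := by
  apply PySem.Dict.ext
  simp [mapD, PySem.Dict.items_insert, pvAccum, PySem.Dict.empty]

-- ===== VERDICT (by name: the statement is the Claim_ definition above) =====
theorem c_Construct_DAG_spec : Claim_equal_c_Construct_DAG := by
  intro G selected_edges tables source _ _
  unfold Spec_c_Construct_DAG c_Construct_DAG c_Construct_DAG_alt
  rw [init_mapD ((pvLookup tables source).getD []) source, fold_mapD]
  simp [mapD]
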